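-- pv_equiv track=rewrite | github.com/daedalus/libciphers | src/libciphers/__init__.py | vigenere_dec_cumulative
-- ===== SOURCE A (Python) =====
-- import string
--
-- A = string.ascii_uppercase
--
-- def let2n(c):
--     """Letter to number (A=0, B=1, ..., Z=25)"""
--     return ord(c.upper()) - 65 if c.upper() in A else -1
--
-- def n2let(n):
--     """Number to letter (0=A, 1=B, ..., 25=Z)"""
--     return chr((n % 26) + 65)
--
-- def vigenere_dec_cumulative(ct, key):
--     """Vigenère with cumulative key (decryption)"""
--     total = 0
--     result = []
--     for i, c in enumerate(ct):
--         if c in A: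
--             total = (total + let2n(key[i % len(key)])) % 26
--             result.append(n2let((let2n(c) - total) % 26))
--         else:
--             result.append(c)
--     return "".join(result)
-- ===== SOURCE B (Python) =====
-- import string
--
--
-- def _val(k):
--     """let2n of a key character: A=0..Z=25 (case-insensitive), -1 otherwise."""
--     u = k.upper()
--     return ord(u) - 65 if 'A' <= u <= 'Z' else -1
--
--
-- def vigenere_dec_cumulative(ct, key):
--     """Vigenère with cumulative key (decryption): prefix-table pass + mapping pass"""
--     m = len(key)
--     totals, t = [], 0
--     for i, c in enumerate(ct):
--         t += _val(key[i % m]) if 'A' <= c <= 'Z' else 0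
--         totals.append(t)
--     return "".join(
--         chr((ord(c) - 65 - totals[i]) % 26 + 65) if 'A' <= c <= 'Z' else c
--         for i, c in enumerate(ct))
-- ===== Notes on version B (the rewrite author's own statement) =====
-- stated objective: alternative
-- what changed: A's single incremental loop carrying a mod-26 running total is replaced by two differently-shaped passes: one pass builds an inclusive prefix-sum table of key contributions (0 at non-letter positions, exact sums, no mod), and a second index-based mapping pass decodes each character from the table; the letter helpers are replaced by direct ord/chr range arithmetic.
import Mathlib
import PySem

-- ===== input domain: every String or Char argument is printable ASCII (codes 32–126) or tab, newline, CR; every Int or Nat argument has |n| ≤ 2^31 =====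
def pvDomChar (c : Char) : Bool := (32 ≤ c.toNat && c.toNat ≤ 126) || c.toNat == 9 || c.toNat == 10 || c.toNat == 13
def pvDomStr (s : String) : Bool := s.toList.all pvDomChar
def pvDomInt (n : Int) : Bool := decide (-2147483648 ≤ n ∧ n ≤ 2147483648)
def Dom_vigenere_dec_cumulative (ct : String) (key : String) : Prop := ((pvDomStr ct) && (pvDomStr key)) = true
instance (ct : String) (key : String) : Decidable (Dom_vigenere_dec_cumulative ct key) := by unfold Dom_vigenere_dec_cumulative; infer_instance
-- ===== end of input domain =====

-- B replaces A's single incremental loop (running total mod 26) by a prefix-sum table pass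
-- followed by an index-based mapping pass; objective: alternative decomposition, same cost.

-- ===== PORT A =====
-- A = string.ascii_uppercase
def pyUpperAlphabet : List Char :=
  ['A','B','C','D','E','F','G','H','I','J','K','L','M',
   'N','O','P','Q','R','S','T','U','V','W','X','Y','Z']

-- c.upper() for one character; exact on the printable-ASCII domain
def upperChar (c : Char) : Char :=
  if 'a' ≤ c ∧ c ≤ 'z' then Char.ofNat (c.toNat - 32) else c

def let2n (c : Char) : Int :=
  if upperChar c ∈ pyUpperAlphabet then ((upperChar c).toNat : Int) - 65 else -1

def n2let (n : Int) : Char := Char.ofNat ((PySem.Int.mod n 26).toNat + 65)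

def vigenere_dec_cumulative (ct : String) (key : String) : String :=
  let ks := key.toList
  let res := (PySem.List.enumerate ct.toList).foldl
    (fun (st : Int × List Char) ic =>
      if ic.2 ∈ pyUpperAlphabet then
        let total := PySem.Int.mod
          (st.1 + let2n (PySem.List.pyGetD ks (PySem.Int.mod ic.1 (ks.length : Int)) 'A')) 26
        (total, st.2 ++ [n2let (PySem.Int.mod (let2n ic.2 - total) 26)])
      else (st.1, st.2 ++ [ic.2]))
    ((0 : Int), ([] : List Char))
  String.mk res.2

-- ===== PORT B =====
-- _val(k): let2n of a key character, by direct range tests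
def keyVal (k : Char) : Int :=
  let u := if 'a' ≤ k ∧ k ≤ 'z' then Char.ofNat (k.toNat - 32) else k
  if 'A' ≤ u ∧ u ≤ 'Z' then (u.toNat : Int) - 65 else -1

def vigenere_dec_cumulative_alt (ct : String) (key : String) : String :=
  let ks := key.toList
  let m : Int := ks.length
  -- pass 1: inclusive prefix-sum table of key contributions
  let totals := ((PySem.List.enumerate ct.toList).foldl
      (fun (st : Int × List Int) ic =>
        let t := st.1 +
          (if 'A' ≤ ic.2 ∧ ic.2 ≤ 'Z' then keyVal (PySem.List.pyGetD ks (PySem.Int.mod ic.1 m) 'A') else 0)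
        (t, st.2 ++ [t])) ((0 : Int), ([] : List Int))).2
  -- pass 2: map each position using the table
  String.mk ((PySem.List.enumerate ct.toList).map (fun ic =>
    if 'A' ≤ ic.2 ∧ ic.2 ≤ 'Z' then
      Char.ofNat ((PySem.Int.mod ((ic.2.toNat : Int) - 65 - PySem.List.pyGetD totals ic.1 0) 26).toNat + 65)
    else ic.2))

-- ===== PRECONDITION & SPEC =====
-- Pre_ excludes only the inputs where Python A raises ZeroDivisionError (i % len(key) with
-- an empty key, reached as soon as ct contains an uppercase letter); B raises there too.
def Pre_vigenere_dec_cumulative (ct : String) (key : String) : Prop :=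
  key.toList ≠ [] ∨ ∀ c ∈ ct.toList, ¬('A' ≤ c ∧ c ≤ 'Z')
instance (ct : String) (key : String) : Decidable (Pre_vigenere_dec_cumulative ct key) := by
  unfold Pre_vigenere_dec_cumulative; infer_instance

def pvWitness_vigenere_dec_cumulative : String × String := ("HELLO, World!", "KeY")

def Spec_vigenere_dec_cumulative (ct : String) (key : String) (out : String) : Prop := out = vigenere_dec_cumulative_alt ct key
instance (ct : String) (key : String) (out : String) : Decidable (Spec_vigenere_dec_cumulative ct key out) := by unfold Spec_vigenere_dec_cumulative; infer_instance

-- ===== CLAIM (what is proved, stated in full; the proofs are below) =====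
def Claim_equal_vigenere_dec_cumulative : Prop := ∀ (ct : String) (key : String), Dom_vigenere_dec_cumulative ct key → Pre_vigenere_dec_cumulative ct key → Spec_vigenere_dec_cumulative ct key (vigenere_dec_cumulative ct key)

-- ===== LEMMAS AND PROOFS =====

theorem mem_pyUpperAlphabet (c : Char) : c ∈ pyUpperAlphabet ↔ ('A' ≤ c ∧ c ≤ 'Z') := by
  constructor
  · intro h; fin_cases h <;> exact ⟨by decide, by decide⟩
  · rintro ⟨h1, h2⟩
    have hl : 65 ≤ c.toNat := Char.le_def.mp h1
    have hr : c.toNat ≤ 90 := Char.le_def.mp h2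
    rw [← Char.ofNat_toNat c]
    interval_cases h : c.toNat <;> decide

theorem not_lower_of_upper (c : Char) (h : 'A' ≤ c ∧ c ≤ 'Z') : ¬('a' ≤ c ∧ c ≤ 'z') := by
  rintro ⟨ha, _⟩
  have h2 : c.toNat ≤ 90 := Char.le_def.mp h.2
  have h3 : 97 ≤ c.toNat := Char.le_def.mp ha
  omega

-- the key-character values of the two ports agree
theorem keyVal_eq_let2n (k : Char) : keyVal k = let2n k := by
  simp only [keyVal, let2n, upperChar, mem_pyUpperAlphabet]

-- A's value of an uppercase letter
theorem let2n_upper (c : Char) (h : 'A' ≤ c ∧ c ≤ 'Z') : let2n c = (c.toNat : Int) - 65 := by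
  rw [let2n, upperChar, if_neg (not_lower_of_upper c h), if_pos ((mem_pyUpperAlphabet c).mpr h)]

def kAt (ks : List Char) (j : Int) : Int :=
  let2n (PySem.List.pyGetD ks (PySem.Int.mod j (ks.length : Int)) 'A')

-- A's loop as a structural recursion (state: reduced running total)
def runA (ks : List Char) : Int → Int → List Char → Int × List Char
  | _, t, [] => (t, [])
  | j, t, c :: cs =>
    if c ∈ pyUpperAlphabet then
      let t' := PySem.Int.mod (t + kAt ks j) 26
      let r := runA ks (j+1) t' cs
      (r.1, n2let (PySem.Int.mod (let2n c - t') 26) :: r.2)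
    else
      let r := runA ks (j+1) t cs
      (r.1, c :: r.2)

-- B's prefix-table loop as a structural recursion (state: exact running total)
def runB (ks : List Char) : Int → Int → List Char → Int × List Int
  | _, t, [] => (t, [])
  | j, t, c :: cs =>
    let t' := t + (if 'A' ≤ c ∧ c ≤ 'Z' then keyVal (PySem.List.pyGetD ks (PySem.Int.mod j (ks.length : Int)) 'A') else 0)
    let r := runB ks (j+1) t' cs
    (r.1, t' :: r.2)

theorem foldA_eq (ks : List Char) :
    ∀ (cs : List Char) (j : Int) (st : Int × List Char),
    (PySem.List.enumerate cs j).foldl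
      (fun (st : Int × List Char) ic =>
        if ic.2 ∈ pyUpperAlphabet then
          let total := PySem.Int.mod
            (st.1 + let2n (PySem.List.pyGetD ks (PySem.Int.mod ic.1 (ks.length : Int)) 'A')) 26
          (total, st.2 ++ [n2let (PySem.Int.mod (let2n ic.2 - total) 26)])
        else (st.1, st.2 ++ [ic.2])) st
    = ((runA ks j st.1 cs).1, st.2 ++ (runA ks j st.1 cs).2) := by
  intro cs
  induction cs with
  | nil => intro j st; simp [PySem.List.enumerate_nil, runA]
  | cons c cs ih =>
    intro j st
    rw [PySem.List.enumerate_cons, List.foldl_cons, ih]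
    by_cases h : c ∈ pyUpperAlphabet <;>
      simp [runA, h, kAt, List.append_assoc]

theorem foldB_eq (ks : List Char) :
    ∀ (cs : List Char) (j : Int) (st : Int × List Int),
    (PySem.List.enumerate cs j).foldl
      (fun (st : Int × List Int) ic =>
        let t := st.1 +
          (if 'A' ≤ ic.2 ∧ ic.2 ≤ 'Z' then keyVal (PySem.List.pyGetD ks (PySem.Int.mod ic.1 (ks.length : Int)) 'A') else 0)
        (t, st.2 ++ [t])) st
    = ((runB ks j st.1 cs).1, st.2 ++ (runB ks j st.1 cs).2) := by
  intro cs
  induction cs with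
  | nil => intro j st; simp [PySem.List.enumerate_nil, runB]
  | cons c cs ih =>
    intro j st
    rw [PySem.List.enumerate_cons, List.foldl_cons, ih]
    simp [runB, List.append_assoc]

theorem pyGetD_cons_pos (x : Int) (S : List Int) (i : Int) (h : 1 ≤ i) :
    PySem.List.pyGetD (x :: S) i 0 = PySem.List.pyGetD S (i - 1) 0 := by
  rw [PySem.List.pyGetD_of_nonneg _ _ (by omega : (0:Int) ≤ i),
      PySem.List.pyGetD_of_nonneg _ _ (by omega : (0:Int) ≤ i - 1)]
  have hn : i.toNat = (i - 1).toNat + 1 := by omega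
  rw [hn]
  rfl

theorem fst_ge_of_mem_enumerate {α : Type} (cs : List α) (s : Int) (p : Int × α)
    (h : p ∈ PySem.List.enumerate cs s) : s ≤ p.1 := by
  rw [PySem.List.mem_enumerate_iff] at h
  obtain ⟨k, hk, rfl⟩ := h
  simp

theorem mapB_eq_runA (ks : List Char) :
    ∀ (cs : List Char) (j tA tB : Int), tA = PySem.Int.mod tB 26 →
    (PySem.List.enumerate cs j).map (fun ic =>
      if 'A' ≤ ic.2 ∧ ic.2 ≤ 'Z' then
        Char.ofNat ((PySem.Int.mod ((ic.2.toNat : Int) - 65 - PySem.List.pyGetD ((runB ks j tB cs).2) (ic.1 - j) 0) 26).toNat + 65)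
      else ic.2)
    = (runA ks j tA cs).2 := by
  intro cs
  induction cs with
  | nil => intro j tA tB hT; simp [PySem.List.enumerate_nil, runA]
  | cons c cs ih =>
    intro j tA tB hT
    rw [PySem.List.enumerate_cons, List.map_cons]
    simp only [runB, runA]
    set K := keyVal (PySem.List.pyGetD ks (PySem.Int.mod j (ks.length : Int)) 'A') with hK
    have hKA : kAt ks j = K := (keyVal_eq_let2n _).symm
    have h26 : (0:Int) < 26 := by norm_num
    by_cases hcu : 'A' ≤ c ∧ c ≤ 'Z'
    · simp only [if_pos hcu, if_pos ((mem_pyUpperAlphabet c).mpr hcu), hKA]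
      have htail :
          (PySem.List.enumerate cs (j+1)).map (fun ic =>
            if 'A' ≤ ic.2 ∧ ic.2 ≤ 'Z' then
              Char.ofNat ((PySem.Int.mod ((ic.2.toNat : Int) - 65 - PySem.List.pyGetD ((tB + K) :: (runB ks (j+1) (tB + K) cs).2) (ic.1 - j) 0) 26).toNat + 65)
            else ic.2)
          = (runA ks (j+1) (PySem.Int.mod (tA + K) 26) cs).2 := by
        rw [List.map_congr_left (g := fun ic =>
            if 'A' ≤ ic.2 ∧ ic.2 ≤ 'Z' then
              Char.ofNat ((PySem.Int.mod ((ic.2.toNat : Int) - 65 - PySem.List.pyGetD ((runB ks (j+1) (tB + K) cs).2) (ic.1 - (j+1)) 0) 26).toNat + 65)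
            else ic.2)]
        · exact ih (j+1) (PySem.Int.mod (tA + K) 26) (tB + K)
            (by rw [hT, PySem.Int.mod_eq_emod_of_pos h26, PySem.Int.mod_eq_emod_of_pos h26,
                    PySem.Int.mod_eq_emod_of_pos h26]; omega)
        · intro p hp
          have hge := fst_ge_of_mem_enumerate cs (j+1) p hp
          by_cases hc2 : 'A' ≤ p.2 ∧ p.2 ≤ 'Z'
          · rw [if_pos hc2, if_pos hc2, pyGetD_cons_pos _ _ _ (by omega)]
            rw [show p.1 - j - 1 = p.1 - (j + 1) by ring]
          · rw [if_neg hc2, if_neg hc2]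
      rw [htail]
      congr 1
      -- head characters agree
      have hz : PySem.List.pyGetD ((tB + K) :: (runB ks (j+1) (tB + K) cs).2) (j - j) 0 = tB + K := by
        have : j - j = (0:Int) := by omega
        rw [this, PySem.List.pyGetD_zero_cons]
      rw [hz, n2let, let2n_upper c hcu]
      congr 2
      simp only [PySem.Int.mod_eq_emod_of_pos h26] at hT ⊢
      rw [hT]
      omega
    · simp only [if_neg hcu, if_neg (fun hm => hcu ((mem_pyUpperAlphabet c).mp hm)), add_zero]
      congr 1
      rw [List.map_congr_left (g := fun ic =>
          if 'A' ≤ ic.2 ∧ ic.2 ≤ 'Z' then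
            Char.ofNat ((PySem.Int.mod ((ic.2.toNat : Int) - 65 - PySem.List.pyGetD ((runB ks (j+1) tB cs).2) (ic.1 - (j+1)) 0) 26).toNat + 65)
          else ic.2)]
      · exact ih (j+1) tA tB hT
      · intro p hp
        have hge := fst_ge_of_mem_enumerate cs (j+1) p hp
        by_cases hc2 : 'A' ≤ p.2 ∧ p.2 ≤ 'Z'
        · rw [if_pos hc2, if_pos hc2, pyGetD_cons_pos _ _ _ (by omega)]
          rw [show p.1 - j - 1 = p.1 - (j + 1) by ring]
        · rw [if_neg hc2, if_neg hc2]

-- ===== VERDICT (by name: the statement is the Claim_ definition above) =====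
theorem vigenere_dec_cumulative_spec : Claim_equal_vigenere_dec_cumulative := by
  intro ct key _ _
  unfold Spec_vigenere_dec_cumulative
  simp only [vigenere_dec_cumulative, vigenere_dec_cumulative_alt]
  rw [foldA_eq, foldB_eq]
  have h := mapB_eq_runA key.toList ct.toList 0 0 0 (by decide)
  simp only [Int.sub_zero] at h
  simp only [List.nil_append]
  exact congrArg String.mk h.symm
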